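-- pv_equiv track=rewrite | github.com/rubaolee/rtdl | examples/rtdl_dbscan_clustering_app.py | _cluster_sizes
-- ===== SOURCE A (Python) =====
-- NOISE_CLUSTER_ID = -1
--
-- def _cluster_sizes(cluster_rows: tuple[dict[str, object], ...]) -> dict[int, int]:
--     sizes: dict[int, int] = {}
--     for row in cluster_rows:
--         cluster_id = int(row["cluster_id"])
--         if cluster_id == NOISE_CLUSTER_ID:
--             continue
--         sizes[cluster_id] = sizes.get(cluster_id, 0) + 1
--     return dict(sorted(sizes.items()))
-- ===== SOURCE B (Python) =====
-- NOISE_CLUSTER_ID = -1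
--
--
-- def _cluster_sizes(cluster_rows):
--     # Sort the non-noise cluster ids first, then count each consecutive run
--     # in a single scan (instead of accumulating a hash map and sorting its items).
--     ids = sorted(c for c in (int(row["cluster_id"]) for row in cluster_rows)
--                  if c != NOISE_CLUSTER_ID)
--     sizes = {}
--     rest = ids
--     while rest:
--         v = rest[0]
--         k = 1
--         while k < len(rest) and rest[k] == v:
--             k += 1
--         sizes[v] = k
--         rest = rest[k:]
--     return sizes
-- ===== Notes on version B (the rewrite author's own statement) =====
-- stated objective: alternative
-- what changed: Replaces the hash-map count accumulation followed by a sort of the items with a sort of the non-noise ids first, then one scan counting consecutive runs.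
import Mathlib
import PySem

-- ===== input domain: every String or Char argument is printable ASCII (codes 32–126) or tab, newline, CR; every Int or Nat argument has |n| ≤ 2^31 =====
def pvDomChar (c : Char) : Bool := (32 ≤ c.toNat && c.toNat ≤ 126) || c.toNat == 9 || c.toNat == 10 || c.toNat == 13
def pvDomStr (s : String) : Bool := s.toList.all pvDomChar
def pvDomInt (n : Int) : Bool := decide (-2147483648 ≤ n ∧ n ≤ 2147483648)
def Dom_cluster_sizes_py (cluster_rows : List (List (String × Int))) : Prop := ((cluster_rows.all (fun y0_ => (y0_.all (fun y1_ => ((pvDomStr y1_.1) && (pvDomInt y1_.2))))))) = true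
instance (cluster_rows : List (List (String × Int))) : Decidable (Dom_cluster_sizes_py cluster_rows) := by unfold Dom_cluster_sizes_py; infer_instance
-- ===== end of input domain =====

-- B sorts the non-noise cluster ids first and counts consecutive runs in one scan,
-- instead of A's hash-map count accumulation followed by a sort of the items.


-- ===== PORT A =====
-- row["cluster_id"]: first-match lookup in the row; `.getD 0` is exact under
-- Pre_cluster_sizes_py, which excludes the rows where Python raises KeyError.
-- int(...) applied to a value that is already an int is the identity.
def pvRowId (row : List (String × Int)) : Int :=
  ((PySem.Dict.mk row).get? "cluster_id").getD 0

def cluster_sizes_py (cluster_rows : List (List (String × Int))) : List (Int × Int) :=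
  let sizes : PySem.Dict Int Int :=
    cluster_rows.foldl
      (fun sizes row =>
        let cluster_id := pvRowId row
        if cluster_id == -1 then sizes
        else sizes.insert cluster_id (sizes.getD cluster_id 0 + 1))
      PySem.Dict.empty
  -- dict(sorted(sizes.items())): Python sorts the (key, value) tuples lexicographically
  PySem.List.sorted2 sizes.items (fun p => p.1) (fun p => p.2)

-- ===== PORT B =====
-- the run-counting while loop: emit (head, run length), continue past the run
def pvRuns (acc : List (Int × Int)) : List Int → List (Int × Int)
  | [] => acc
  | v :: rest =>
      pvRuns (acc ++ [(v, 1 + ((rest.takeWhile (fun c => c == v)).length : Int))])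
        (rest.dropWhile (fun c => c == v))
  termination_by l => l.length
  decreasing_by
    have := List.length_dropWhile_le (fun c => c == v) rest
    simp; omega

def cluster_sizes_py_alt (cluster_rows : List (List (String × Int))) : List (Int × Int) :=
  let ids := PySem.List.sorted ((cluster_rows.map pvRowId).filter (fun c => c != -1)) (fun x => x)
  pvRuns [] ids

-- ===== PRECONDITION & SPEC =====
-- Pre_ excludes exactly the inputs where some row lacks the key "cluster_id":
-- there Python A raises KeyError (and so does B).
def Pre_cluster_sizes_py (cluster_rows : List (List (String × Int))) : Prop :=
  (cluster_rows.all (fun row => row.any (fun p => p.1 == "cluster_id"))) = true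
instance (cluster_rows : List (List (String × Int))) : Decidable (Pre_cluster_sizes_py cluster_rows) := by unfold Pre_cluster_sizes_py; infer_instance

def pvWitness_cluster_sizes_py : (List (List (String × Int))) :=
  [[("cluster_id", 2)], [("cluster_id", -1)], [("cluster_id", 0)], [("cluster_id", 2)]]

def Spec_cluster_sizes_py (cluster_rows : List (List (String × Int))) (out : List (Int × Int)) : Prop := out = cluster_sizes_py_alt cluster_rows
instance (cluster_rows : List (List (String × Int))) (out : List (Int × Int)) : Decidable (Spec_cluster_sizes_py cluster_rows out) := by unfold Spec_cluster_sizes_py; infer_instance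

-- ===== CLAIM (what is proved, stated in full; the proofs are below) =====
def Claim_equal_cluster_sizes_py : Prop := ∀ (cluster_rows : List (List (String × Int))), Dom_cluster_sizes_py cluster_rows → Pre_cluster_sizes_py cluster_rows → Spec_cluster_sizes_py cluster_rows (cluster_sizes_py cluster_rows)

-- ===== LEMMAS AND PROOFS =====

-- A's accumulation loop is the counting loop over the non-noise ids.
theorem pvFold_eq_counter (rows : List (List (String × Int))) (d : PySem.Dict Int Int) :
    rows.foldl
      (fun sizes row =>
        let cluster_id := pvRowId row
        if cluster_id == -1 then sizes
        else sizes.insert cluster_id (sizes.getD cluster_id 0 + 1)) d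
    = ((rows.map pvRowId).filter (fun c => c != -1)).foldl
        (fun sizes x => sizes.insert x (sizes.getD x 0 + 1)) d := by
  induction rows generalizing d with
  | nil => rfl
  | cons r rs ih =>
      simp only [List.foldl_cons, List.map_cons, List.filter_cons]
      by_cases h : pvRowId r = -1
      · simp only [h]; simp only [show ((-1 : Int) == -1) = true from rfl,
          show ((-1 : Int) != -1) = false from rfl, if_true, Bool.false_eq_true, if_false]
        exact ih d
      · simp only [show (pvRowId r == -1) = false from by simp [h],
          show (pvRowId r != -1) = true from by simp [h], Bool.false_eq_true, if_false, if_true,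
          List.foldl_cons]
        exact ih _

-- the accumulator of pvRuns only collects output (fuel = length bound)
theorem pvRuns_acc (n : Nat) (acc : List (Int × Int)) (s : List Int) (hn : s.length ≤ n) :
    pvRuns acc s = acc ++ pvRuns [] s := by
  induction n generalizing acc s with
  | zero =>
      have : s = [] := List.length_eq_zero_iff.mp (Nat.le_zero.mp hn)
      subst this; simp [pvRuns]
  | succ n ih =>
      cases s with
      | nil => simp [pvRuns]
      | cons v rest =>
          have hd_len : (rest.dropWhile (fun c => c == v)).length ≤ n := by
            have := List.length_dropWhile_le (fun c => c == v) rest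
            simp at hn; omega
          rw [pvRuns, pvRuns,
            ih (acc ++ [(v, 1 + ((rest.takeWhile (fun c => c == v)).length : Int))]) _ hd_len,
            ih ([] ++ [(v, 1 + ((rest.takeWhile (fun c => c == v)).length : Int))]) _ hd_len]
          simp

theorem pvRuns_cons (v : Int) (rest : List Int) :
    pvRuns [] (v :: rest)
      = (v, 1 + ((rest.takeWhile (fun c => c == v)).length : Int))
          :: pvRuns [] (rest.dropWhile (fun c => c == v)) := by
  rw [pvRuns, pvRuns_acc (rest.dropWhile (fun c => c == v)).length _ _ le_rfl]
  simp

-- on a ≤-sorted list, everything past the leading run of v is strictly above v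
theorem pvDropWhile_gt (v : Int) (l : List Int) (hs : l.Pairwise (· ≤ ·))
    (hall : ∀ y ∈ l, v ≤ y) :
    ∀ x ∈ l.dropWhile (fun c => c == v), v < x := by
  induction l with
  | nil => simp
  | cons a t ih =>
      intro x hx
      rw [List.dropWhile_cons] at hx
      by_cases ha : (a == v) = true
      · rw [if_pos ha] at hx
        exact ih (List.pairwise_cons.mp hs).2
          (fun y hy => hall y (List.mem_cons_of_mem _ hy)) x hx
      · rw [if_neg ha] at hx
        have hav : a ≠ v := by simpa using ha
        have hva : v < a := lt_of_le_of_ne (hall a List.mem_cons_self) (Ne.symm hav)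
        rcases List.mem_cons.mp hx with hx | hx
        · exact hx ▸ hva
        · exact lt_of_lt_of_le hva ((List.pairwise_cons.mp hs).1 x hx)

-- counts in a sorted list v :: rest, split as takeWhile/dropWhile
theorem pvCount_head (v : Int) (rest : List Int)
    (hs : (v :: rest).Pairwise (· ≤ ·)) :
    (v :: rest).count v = 1 + (rest.takeWhile (fun c => c == v)).length := by
  have hsplit := List.takeWhile_append_dropWhile (p := fun c => c == v) (l := rest)
  have ht : (rest.takeWhile (fun c => c == v)).count v
      = (rest.takeWhile (fun c => c == v)).length :=
    List.count_eq_length.mpr (fun b hb => by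
      have hbv : b = v := by simpa using List.mem_takeWhile_imp hb
      exact hbv.symm)
  have hd : (rest.dropWhile (fun c => c == v)).count v = 0 :=
    List.count_eq_zero.mpr (fun hmem =>
      lt_irrefl v (pvDropWhile_gt v rest (List.pairwise_cons.mp hs).2
        (List.pairwise_cons.mp hs).1 v hmem))
  calc (v :: rest).count v = rest.count v + 1 := List.count_cons_self ..
    _ = ((rest.takeWhile (fun c => c == v)) ++ (rest.dropWhile (fun c => c == v))).count v + 1 := by rw [hsplit]
    _ = 1 + (rest.takeWhile (fun c => c == v)).length := by
        rw [List.count_append, ht, hd]; omega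

theorem pvCount_rest (v k : Int) (rest : List Int) (hk : k ≠ v) :
    (v :: rest).count k = (rest.dropWhile (fun c => c == v)).count k := by
  have hsplit := List.takeWhile_append_dropWhile (p := fun c => c == v) (l := rest)
  have ht : (rest.takeWhile (fun c => c == v)).count k = 0 :=
    List.count_eq_zero.mpr (fun hmem => hk (by simpa using List.mem_takeWhile_imp hmem))
  calc (v :: rest).count k = rest.count k := by
        rw [List.count_cons]; simp [Ne.symm hk]
    _ = ((rest.takeWhile (fun c => c == v)) ++ (rest.dropWhile (fun c => c == v))).count k := by rw [hsplit]
    _ = (rest.dropWhile (fun c => c == v)).count k := by rw [List.count_append, ht]; omega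

-- membership characterisation of the run counter on a sorted list (fuel = length bound)
theorem pvRuns_mem (n : Nat) (s : List Int) (hn : s.length ≤ n)
    (hs : s.Pairwise (· ≤ ·)) (p : Int × Int) :
    p ∈ pvRuns [] s ↔ (p.1 ∈ s ∧ p.2 = (s.count p.1 : Int)) := by
  induction n generalizing s with
  | zero =>
      have : s = [] := List.length_eq_zero_iff.mp (Nat.le_zero.mp hn)
      subst this; simp [pvRuns]
  | succ n ih =>
      cases s with
      | nil => simp [pvRuns]
      | cons v rest =>
          have hps := List.pairwise_cons.mp hs
          have hd_pair : (rest.dropWhile (fun c => c == v)).Pairwise (· ≤ ·) :=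
            List.Pairwise.sublist ((List.dropWhile_suffix (l := rest) (fun c => c == v)).sublist) hps.2
          have hd_len : (rest.dropWhile (fun c => c == v)).length ≤ n := by
            have := List.length_dropWhile_le (fun c => c == v) rest
            simp at hn; omega
          have hgt : ∀ x ∈ rest.dropWhile (fun c => c == v), v < x :=
            pvDropWhile_gt v rest hps.2 hps.1
          rw [pvRuns_cons]
          constructor
          · intro hp
            rcases List.mem_cons.mp hp with hp | hp
            · subst hp
              refine ⟨by simp, ?_⟩
              show (1 : Int) + _ = _
              rw [pvCount_head v rest hs]; push_cast; ring
            · obtain ⟨hp1, hp2⟩ := (ih _ hd_len hd_pair).mp hp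
              have hne : p.1 ≠ v := ne_of_gt (hgt p.1 hp1)
              refine ⟨List.mem_cons_of_mem _
                ((List.dropWhile_suffix (l := rest) (fun c => c == v)).sublist.subset hp1), ?_⟩
              rw [pvCount_rest v p.1 rest hne]; exact hp2
          · rintro ⟨hp1, hp2⟩
            by_cases hpv : p.1 = v
            · have hpe : p = (v, 1 + ((rest.takeWhile (fun c => c == v)).length : Int)) := by
                have h2 : p.2 = 1 + ((rest.takeWhile (fun c => c == v)).length : Int) := by
                  rw [hp2, hpv, pvCount_head v rest hs]; push_cast; ring
                calc p = (p.1, p.2) := rfl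
                  _ = (v, 1 + ((rest.takeWhile (fun c => c == v)).length : Int)) := by
                      rw [hpv, h2]
              exact List.mem_cons.mpr (Or.inl hpe)
            · apply List.mem_cons_of_mem
              apply (ih _ hd_len hd_pair).mpr
              have hmem : p.1 ∈ rest := by
                rcases List.mem_cons.mp hp1 with h | h
                · exact absurd h hpv
                · exact h
              have hmemd : p.1 ∈ rest.dropWhile (fun c => c == v) := by
                have hsplit := List.takeWhile_append_dropWhile (p := fun c => c == v) (l := rest)
                rw [← hsplit] at hmem
                rcases List.mem_append.mp hmem with h | h
                · exact absurd (by simpa using List.mem_takeWhile_imp h) hpv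
                · exact h
              exact ⟨hmemd, by rw [hp2, pvCount_rest v p.1 rest hpv]⟩

theorem pvRuns_pairwise (n : Nat) (s : List Int) (hn : s.length ≤ n)
    (hs : s.Pairwise (· ≤ ·)) :
    (pvRuns [] s).Pairwise (fun a b => a.1 < b.1) := by
  induction n generalizing s with
  | zero =>
      have : s = [] := List.length_eq_zero_iff.mp (Nat.le_zero.mp hn)
      subst this; simp [pvRuns]
  | succ n ih =>
      cases s with
      | nil => simp [pvRuns]
      | cons v rest =>
          have hps := List.pairwise_cons.mp hs
          have hd_pair : (rest.dropWhile (fun c => c == v)).Pairwise (· ≤ ·) :=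
            List.Pairwise.sublist ((List.dropWhile_suffix (l := rest) (fun c => c == v)).sublist) hps.2
          have hd_len : (rest.dropWhile (fun c => c == v)).length ≤ n := by
            have := List.length_dropWhile_le (fun c => c == v) rest
            simp at hn; omega
          have hgt : ∀ x ∈ rest.dropWhile (fun c => c == v), v < x :=
            pvDropWhile_gt v rest hps.2 hps.1
          rw [pvRuns_cons]
          refine List.pairwise_cons.mpr ⟨?_, ih _ hd_len hd_pair⟩
          intro q hq
          have hq' := (pvRuns_mem n _ hd_len hd_pair q).mp hq
          exact hgt q.1 hq'.1

-- insertBy only compares the inserted element with list elements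
theorem pvInsertBy_congr {α : Type} (b1 b2 : α → α → Bool) (x : α) (ys : List α)
    (h : ∀ y ∈ ys, b1 x y = b2 x y) :
    PySem.List.insertBy b1 x ys = PySem.List.insertBy b2 x ys := by
  induction ys with
  | nil => rfl
  | cons y ys ih =>
      simp only [PySem.List.insertBy]
      rw [h y List.mem_cons_self]
      split
      · rfl
      · rw [ih (fun z hz => h z (List.mem_cons_of_mem _ hz))]

theorem pvFoldl_insertBy_congr {α : Type} (b1 b2 : α → α → Bool) (xs acc : List α)
    (h : ∀ a ∈ xs, ∀ b, (b ∈ acc ∨ b ∈ xs) → b1 a b = b2 a b) :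
    xs.foldl (fun acc x => PySem.List.insertBy b1 x acc) acc
      = xs.foldl (fun acc x => PySem.List.insertBy b2 x acc) acc := by
  induction xs generalizing acc with
  | nil => rfl
  | cons x xs ih =>
      simp only [List.foldl_cons]
      rw [pvInsertBy_congr b1 b2 x acc
        (fun y hy => h x List.mem_cons_self y (Or.inl hy))]
      apply ih
      intro a ha b hb
      apply h a (List.mem_cons_of_mem _ ha)
      rcases hb with hb | hb
      · rcases (PySem.List.mem_insertBy b2 x b acc).mp hb with hb | hb
        · exact Or.inr (hb ▸ List.mem_cons_self)
        · exact Or.inl hb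
      · exact Or.inr (List.mem_cons_of_mem _ hb)

-- Python's lexicographic tuple sort of the items of a counter is the sort by key
theorem pvSorted2_items (items : List (Int × Int))
    (hinj : ∀ p ∈ items, ∀ q ∈ items, p.1 = q.1 → p = q) :
    PySem.List.sorted2 items (fun p => p.1) (fun p => p.2)
      = PySem.List.sorted items (fun p => p.1) := by
  rw [PySem.List.sorted_eq_foldl_insertBy]
  show items.foldl (fun acc x => PySem.List.insertBy _ x acc) [] = _
  apply pvFoldl_insertBy_congr
  intro a ha b hb
  rcases hb with hb | hb
  · simp at hb
  · by_cases hab : a.1 = b.1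
    · have : a = b := hinj a ha b hb hab
      subst this
      simp
    · rcases lt_trichotomy a.1 b.1 with h | h | h
      · simp [h, not_lt_of_gt h]
      · exact absurd h hab
      · simp [h, not_lt_of_gt h]

-- ===== VERDICT (by name: the statement is the Claim_ definition above) =====
theorem cluster_sizes_py_spec : Claim_equal_cluster_sizes_py := by
  intro rows _ _
  unfold Spec_cluster_sizes_py cluster_sizes_py cluster_sizes_py_alt
  simp only [pvFold_eq_counter, PySem.Dict.foldl_insert_getD_add_one_eq_counter]
  set ids := (rows.map pvRowId).filter (fun c => c != -1) with hids
  set s := PySem.List.sorted ids (fun x => x) with hsrt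
  have hs_pair : s.Pairwise (· ≤ ·) := PySem.List.sorted_pairwise ids (fun x => x)
  have hs_perm : s.Perm ids := PySem.List.sorted_perm ids (fun x => x) false
  rw [PySem.Dict.items_counter]
  have hmem_items : ∀ p : Int × Int,
      p ∈ (PySem.Set.ofList ids).map (fun k => (k, (ids.count k : Int)))
        ↔ (p.1 ∈ ids ∧ p.2 = (ids.count p.1 : Int)) := by
    intro p
    simp only [List.mem_map, PySem.Set.mem_ofList]
    constructor
    · rintro ⟨k, hk, rfl⟩; exact ⟨hk, rfl⟩
    · rintro ⟨h1, h2⟩; exact ⟨p.1, h1, by rw [← h2]⟩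
  rw [pvSorted2_items]
  · apply PySem.List.sorted_eq_of_perm_of_pairwise_lt
    · rw [List.perm_ext_iff_of_nodup]
      · intro p
        rw [pvRuns_mem s.length s le_rfl hs_pair p, hmem_items p,
          hs_perm.mem_iff, hs_perm.count_eq]
      · exact List.Pairwise.imp (fun h => by
          intro he; rw [he] at h; exact lt_irrefl _ h)
          (pvRuns_pairwise s.length s le_rfl hs_pair)
      · exact List.Nodup.map (fun a b h => (Prod.mk.injEq ..).mp h |>.1)
          (PySem.Set.nodup_ofList ids)
    · exact pvRuns_pairwise s.length s le_rfl hs_pair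
  · intro p hp q hq hpq
    rw [hmem_items] at hp hq
    calc p = (p.1, p.2) := rfl
      _ = (q.1, q.2) := by rw [hp.2, hq.2, hpq]
      _ = q := rfl
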